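-- pv_equiv track=rewrite | github.com/rhelmstedter/pybites | 72/belt.py | get_belt
-- ===== SOURCE A (Python) =====
-- from typing import Union
--
-- scores = [10, 50, 100, 175, 250, 400, 600, 800, 1000]
--
-- belts = "white yellow orange green blue brown black paneled red".split()
--
-- def get_belt(
--     user_score: int, scores: list = scores, belts: list = belts
-- ) -> Union[None, str]:
--
--     if user_score < 10:
--         return None
--     elif user_score >= 1000:
--         return 'red'
--     else:
--         for i, (low, high) in enumerate(zip(scores, scores[1:])):
--             if low <= user_score < high:
--                 return belts[i]
-- ===== SOURCE B (Python) =====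
-- scores = [10, 50, 100, 175, 250, 400, 600, 800, 1000]
-- belts = "white yellow orange green blue brown black paneled red".split()
--
-- def get_belt(user_score, scores=scores, belts=belts):
--     if user_score < 10:
--         return None
--     if user_score >= 1000:
--         return 'red'
--     return _bracket(user_score, scores, belts)
--
-- def _bracket(us, ss, bs):
--     # recursion on the structure: consume scores and belts in lockstep,
--     # no indices, no enumerate/zip
--     if len(ss) < 2:
--         return None
--     if ss[0] <= us < ss[1]:
--         return bs[0]
--     return _bracket(us, ss[1:], bs[1:])
-- ===== Notes on version B (the rewrite author's own statement) =====
-- stated objective: alternative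
-- what changed: A's indexed forward scan over enumerate(zip(scores, scores[1:])) followed by a belts[i] lookup is replaced by structural recursion that consumes the scores and belts lists in lockstep, so no index, enumerate, zip or slice pairing exists at all: the answer is the head of the remaining belts list when the head bracket matches.
import Mathlib
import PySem

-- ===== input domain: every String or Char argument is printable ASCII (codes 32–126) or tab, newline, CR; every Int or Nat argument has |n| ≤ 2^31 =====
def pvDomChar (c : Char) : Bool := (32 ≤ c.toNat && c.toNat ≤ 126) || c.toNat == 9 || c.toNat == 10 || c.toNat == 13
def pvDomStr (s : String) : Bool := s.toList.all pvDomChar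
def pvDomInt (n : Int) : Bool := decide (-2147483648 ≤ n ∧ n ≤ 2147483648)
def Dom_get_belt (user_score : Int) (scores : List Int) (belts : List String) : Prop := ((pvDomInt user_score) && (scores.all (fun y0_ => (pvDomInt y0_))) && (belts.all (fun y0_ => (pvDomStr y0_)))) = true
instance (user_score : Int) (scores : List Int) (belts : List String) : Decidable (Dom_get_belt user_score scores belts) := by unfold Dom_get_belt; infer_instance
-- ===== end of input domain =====

-- B replaces A's indexed scan over enumerate(zip(scores, scores[1:])) + belts[i] lookup
-- by structural recursion consuming scores and belts in lockstep (no indices at all);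
-- objective: alternative (same cost, different algorithmic decomposition).


-- ===== PORT A =====
-- 'for i, (low, high) in enumerate(zip(scores, scores[1:]))'; scores[1:] = scores.drop 1;
-- 'return belts[i]' is pyGet? (none exactly where Python raises IndexError, excluded by Pre_).
def getBeltLoopA (us : Int) (belts : List String) : List (Int × Int) → Nat → Option String
  | [], _ => none
  | (low, high) :: rest, i =>
    if low ≤ us ∧ us < high then PySem.List.pyGet? belts (i : Int)
    else getBeltLoopA us belts rest (i + 1)

def get_belt (user_score : Int) (scores : List Int) (belts : List String) : Option String :=
  if user_score < 10 then none
  else if 1000 ≤ user_score then some "red"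
  else getBeltLoopA user_score belts (scores.zip (scores.drop 1)) 0

-- ===== PORT B =====
-- _bracket: structural recursion, scores and belts consumed in lockstep;
-- 'bs[0]' is pyGet? bs 0 (none exactly where Python raises IndexError), 'bs[1:]' is bs.drop 1.
def bracketB (us : Int) : List Int → List String → Option String
  | a :: b :: rest, bs =>
    if a ≤ us ∧ us < b then PySem.List.pyGet? bs 0
    else bracketB us (b :: rest) (bs.drop 1)
  | _, _ => none

def get_belt_alt (user_score : Int) (scores : List Int) (belts : List String) : Option String :=
  if user_score < 10 then none
  else if 1000 ≤ user_score then some "red"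
  else bracketB user_score scores belts

-- ===== PRECONDITION & SPEC =====
-- Pre_ excludes exactly the inputs where Python A raises IndexError (the first matching
-- bracket index is ≥ len(belts)); Python B raises IndexError on exactly the same inputs.
def Pre_get_belt (user_score : Int) (scores : List Int) (belts : List String) : Prop :=
  10 ≤ user_score → user_score < 1000 →
  ∀ i < scores.length, i + 1 < scores.length →
    (scores.getD i 0 ≤ user_score ∧ user_score < scores.getD (i + 1) 0) →
    (∀ j < i, ¬(scores.getD j 0 ≤ user_score ∧ user_score < scores.getD (j + 1) 0)) →
    i < belts.length
instance (user_score : Int) (scores : List Int) (belts : List String) : Decidable (Pre_get_belt user_score scores belts) := by unfold Pre_get_belt; infer_instance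

def pvWitness_get_belt : Int × List Int × List String :=
  (500, [10, 50, 100, 175, 250, 400, 600, 800, 1000],
   ["white", "yellow", "orange", "green", "blue", "brown", "black", "paneled", "red"])

def Spec_get_belt (user_score : Int) (scores : List Int) (belts : List String) (out : Option String) : Prop := out = get_belt_alt user_score scores belts
instance (user_score : Int) (scores : List Int) (belts : List String) (out : Option String) : Decidable (Spec_get_belt user_score scores belts out) := by unfold Spec_get_belt; infer_instance

-- ===== CLAIM (what is proved, stated in full; the proofs are below) =====
def Claim_equal_get_belt : Prop := ∀ (user_score : Int) (scores : List Int) (belts : List String), Dom_get_belt user_score scores belts → Pre_get_belt user_score scores belts → Spec_get_belt user_score scores belts (get_belt user_score scores belts)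

-- ===== LEMMAS AND PROOFS =====

-- A's loop at offset k over the zipped tail equals B's lockstep recursion on belts.drop k.
theorem loopA_eq_bracketB (us : Int) (belts : List String) :
    ∀ (scores : List Int) (k : Nat),
      getBeltLoopA us belts (scores.zip (scores.drop 1)) k
        = bracketB us scores (belts.drop k) := by
  intro scores
  induction scores with
  | nil => intro k; simp [getBeltLoopA, bracketB]
  | cons a tl ih =>
    intro k
    cases tl with
    | nil => simp [getBeltLoopA, bracketB]
    | cons b rest =>
      simp only [List.drop_one, List.tail_cons, List.zip_cons_cons, getBeltLoopA, bracketB]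
      split
      · rw [PySem.List.pyGet?_natCast, PySem.List.pyGet?_zero, List.getElem?_drop,
          Nat.add_zero]
      · have := ih (k + 1)
        simp only [List.drop_one, List.tail_cons] at this
        rw [this, ← List.tail_drop]

theorem ports_eq (us : Int) (scores : List Int) (belts : List String) :
    get_belt us scores belts = get_belt_alt us scores belts := by
  unfold get_belt get_belt_alt
  split
  · rfl
  · split
    · rfl
    · simpa using loopA_eq_bracketB us belts scores 0

-- ===== VERDICT (by name: the statement is the Claim_ definition above) =====
theorem get_belt_spec : Claim_equal_get_belt := by
  intro us scores belts _ _
  unfold Spec_get_belt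
  exact ports_eq us scores belts
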